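-- pv_equiv track=rewrite | github.com/NhoHoa/WITapps | asang/views.py | findSpece
-- ===== SOURCE A (Python) =====
-- def findSpece(row):
-- 	i=0
-- 	for x in row:
-- 		if(x==''):
-- 			i = i+1
-- 		else:
-- 			i=0
-- 	return i
-- ===== SOURCE B (Python) =====
-- def findSpece(row):
--     n = 0
--     for x in reversed(list(row)):
--         if x != '':
--             break
--         n += 1
--     return n
-- ===== Notes on version B (the rewrite author's own statement) =====
-- stated objective: simpler
-- what changed: Replaces the full forward scan with reset-on-nonempty by a reverse scan that counts trailing '' and stops at the first non-empty element.
import Mathlib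
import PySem

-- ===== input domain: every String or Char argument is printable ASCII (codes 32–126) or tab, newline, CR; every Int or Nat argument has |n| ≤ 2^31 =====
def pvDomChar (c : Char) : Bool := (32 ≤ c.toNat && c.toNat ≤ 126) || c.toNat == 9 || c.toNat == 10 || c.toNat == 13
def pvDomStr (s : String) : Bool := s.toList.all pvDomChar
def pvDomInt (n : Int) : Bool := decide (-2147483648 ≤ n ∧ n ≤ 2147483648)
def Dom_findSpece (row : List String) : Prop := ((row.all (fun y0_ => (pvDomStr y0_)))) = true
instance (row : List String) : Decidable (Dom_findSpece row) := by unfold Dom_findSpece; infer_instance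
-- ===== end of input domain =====

-- B changes the pass shape: reverse scan counting trailing '' with early break, instead of A's forward scan resetting on non-empty (objective: simpler).

-- ===== PORT A =====
-- forward fold over the row, resetting the counter on a non-empty cell
def findSpece (row : List String) : Int :=
  row.foldl (fun i x => if x = "" then i + 1 else 0) 0

-- ===== PORT B =====
-- reverse scan with early termination: count leading '' of the reversed list
def findSpeceAltLoop : List String → Int
  | [] => 0
  | x :: xs => if x ≠ "" then 0 else findSpeceAltLoop xs + 1

def findSpece_alt (row : List String) : Int :=
  findSpeceAltLoop row.reverse

-- ===== PRECONDITION & SPEC =====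
def Spec_findSpece (row : List String) (out : Int) : Prop := out = findSpece_alt row
instance (row : List String) (out : Int) : Decidable (Spec_findSpece row out) := by unfold Spec_findSpece; infer_instance

-- ===== CLAIM (what is proved, stated in full; the proofs are below) =====
def Claim_equal_findSpece : Prop := ∀ (row : List String), Dom_findSpece row → Spec_findSpece row (findSpece row)

-- ===== LEMMAS AND PROOFS =====
theorem findSpece_eq_alt (row : List String) : findSpece row = findSpece_alt row := by
  induction row using List.reverseRecOn with
  | nil => rfl
  | append_singleton l x ih =>
      simp only [findSpece, List.foldl_append, List.foldl_cons, List.foldl_nil,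
        findSpece_alt, List.reverse_append, List.reverse_cons, List.reverse_nil,
        List.nil_append, List.cons_append, findSpeceAltLoop] at *
      by_cases hx : x = "" <;> simp [hx, ih]

-- ===== VERDICT (by name: the statement is the Claim_ definition above) =====
theorem findSpece_spec : Claim_equal_findSpece := by
  intro row _
  exact findSpece_eq_alt row
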